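-- pv_equiv track=rewrite | github.com/titipong7/rst-test-specs-tns | src/rst_compliance/rst_dashboard.py | _case_status_index
-- ===== SOURCE A (Python) =====
-- from typing import Any, Sequence
--
-- def _case_status_index(case_results: list[dict[str, Any]]) -> dict[str, list[str]]:
--     by_name: dict[str, list[str]] = {}
--     for result in case_results:
--         node_id = str(result.get("testCase", ""))
--         if "::" not in node_id:
--             continue
--         test_name = node_id.rsplit("::", 1)[-1]
--         by_name.setdefault(test_name, []).append(str(result.get("status", "")).lower())
--     return by_name
-- ===== SOURCE B (Python) =====
-- def _case_status_index(case_results):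
--     # Different decomposition: one flat pass extracting (test_name, status) pairs,
--     # then group by building each name's status list with a per-key filter,
--     # keys in first-occurrence order (dict.fromkeys), instead of A's setdefault bucketing.
--     pairs = []
--     for result in case_results:
--         node_id = str(result.get("testCase", ""))
--         if "::" in node_id:
--             pairs.append((node_id.rsplit("::", 1)[-1],
--                           str(result.get("status", "")).lower()))
--     return {name: [s for n, s in pairs if n == name]
--             for name in dict.fromkeys(n for n, _ in pairs)}
-- ===== Notes on version B (the rewrite author's own statement) =====
-- stated objective: alternative
-- what changed: Replaces A's incremental setdefault/append dict-bucketing with a two-phase pass: first flatten to a (test_name, status) pair list, then build the result per distinct name (dict.fromkeys order) by filtering the pair list.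
import Mathlib
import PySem

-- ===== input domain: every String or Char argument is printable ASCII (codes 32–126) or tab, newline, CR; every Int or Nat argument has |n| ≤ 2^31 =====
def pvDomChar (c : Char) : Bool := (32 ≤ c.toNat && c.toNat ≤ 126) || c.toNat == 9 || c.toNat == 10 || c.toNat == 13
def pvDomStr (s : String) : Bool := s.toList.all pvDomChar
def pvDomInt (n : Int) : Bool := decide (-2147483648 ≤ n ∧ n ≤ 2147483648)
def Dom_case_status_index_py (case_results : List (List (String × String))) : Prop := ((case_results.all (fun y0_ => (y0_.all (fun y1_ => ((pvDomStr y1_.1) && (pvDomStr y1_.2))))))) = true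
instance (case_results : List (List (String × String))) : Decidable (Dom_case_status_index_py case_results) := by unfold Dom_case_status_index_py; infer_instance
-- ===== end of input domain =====

-- B groups by a flat pair list + per-name filter (first-occurrence key order) instead of A's setdefault/append bucketing; same return value, no side effects.

-- ===== PORT A =====
-- node_id.rsplit("::", 1)[-1]  (used only when "::" is in node_id): the suffix after the last "::"
def pvLastSeg (s : String) : String := PySem.Str.slice s (some (PySem.Str.rfind s "::" + 2)) none

def case_status_index_py (case_results : List (List (String × String))) : List (String × List String) :=
  (case_results.foldl
    (fun (by_name : PySem.Dict String (List String)) result =>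
      let node_id := (PySem.Dict.mk result).getD "testCase" ""
      if PySem.Str.isIn "::" node_id then
        by_name.modify (pvLastSeg node_id) []
          (fun v => v ++ [PySem.Str.lower ((PySem.Dict.mk result).getD "status" "")])
      else by_name)
    PySem.Dict.empty).items

-- ===== PORT B =====
def case_status_index_py_alt (case_results : List (List (String × String))) : List (String × List String) :=
  let pairs := case_results.foldl
    (fun (ps : List (String × String)) result =>
      let node_id := (PySem.Dict.mk result).getD "testCase" ""
      if PySem.Str.isIn "::" node_id then
        ps ++ [(pvLastSeg node_id, PySem.Str.lower ((PySem.Dict.mk result).getD "status" ""))]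
      else ps) []
  (PySem.List.dedup (pairs.map (·.1))).map
    (fun name => (name, (pairs.filter (fun p => p.1 == name)).map (·.2)))

-- ===== PRECONDITION & SPEC =====
def Spec_case_status_index_py (case_results : List (List (String × String))) (out : List (String × List String)) : Prop := out = case_status_index_py_alt case_results
instance (case_results : List (List (String × String))) (out : List (String × List String)) : Decidable (Spec_case_status_index_py case_results out) := by unfold Spec_case_status_index_py; infer_instance

-- ===== CLAIM (what is proved, stated in full; the proofs are below) =====
def Claim_equal_case_status_index_py : Prop := ∀ (case_results : List (List (String × String))), Dom_case_status_index_py case_results → Spec_case_status_index_py case_results (case_status_index_py case_results)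

-- ===== LEMMAS AND PROOFS =====

-- the (test_name, lowered status) pair a row contributes, or none when "::" is absent
def pvPair? (result : List (String × String)) : Option (String × String) :=
  let node_id := (PySem.Dict.mk result).getD "testCase" ""
  if PySem.Str.isIn "::" node_id then
    some (pvLastSeg node_id, PySem.Str.lower ((PySem.Dict.mk result).getD "status" ""))
  else none

theorem pvB_step (ps : List (String × String)) (result : List (String × String)) :
    (let node_id := (PySem.Dict.mk result).getD "testCase" ""
     if PySem.Str.isIn "::" node_id then
       ps ++ [(pvLastSeg node_id, PySem.Str.lower ((PySem.Dict.mk result).getD "status" ""))]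
     else ps)
    = ps ++ (pvPair? result).toList := by
  simp only [pvPair?]
  split <;> simp

theorem pvA_step (d : PySem.Dict String (List String)) (result : List (String × String)) :
    (let node_id := (PySem.Dict.mk result).getD "testCase" ""
     if PySem.Str.isIn "::" node_id then
       d.modify (pvLastSeg node_id) []
         (fun v => v ++ [PySem.Str.lower ((PySem.Dict.mk result).getD "status" "")])
     else d)
    = (pvPair? result).elim d (fun p => d.modify p.1 [] (fun v => v ++ [p.2])) := by
  simp only [pvPair?]
  split <;> simp

theorem pvB_pairs (rs : List (List (String × String))) (ps : List (String × String)) :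
    rs.foldl
      (fun (ps : List (String × String)) result =>
        let node_id := (PySem.Dict.mk result).getD "testCase" ""
        if PySem.Str.isIn "::" node_id then
          ps ++ [(pvLastSeg node_id, PySem.Str.lower ((PySem.Dict.mk result).getD "status" ""))]
        else ps) ps
    = ps ++ rs.filterMap pvPair? := by
  induction rs generalizing ps with
  | nil => simp
  | cons r rs ih =>
    rw [List.foldl_cons, pvB_step, ih, List.filterMap_cons]
    cases pvPair? r <;> simp

theorem pvA_fold (rs : List (List (String × String))) (d : PySem.Dict String (List String)) :
    rs.foldl
      (fun (by_name : PySem.Dict String (List String)) result =>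
        let node_id := (PySem.Dict.mk result).getD "testCase" ""
        if PySem.Str.isIn "::" node_id then
          by_name.modify (pvLastSeg node_id) []
            (fun v => v ++ [PySem.Str.lower ((PySem.Dict.mk result).getD "status" "")])
        else by_name) d
    = (rs.filterMap pvPair?).foldl (fun d p => d.modify p.1 [] (fun v => v ++ [p.2])) d := by
  induction rs generalizing d with
  | nil => simp
  | cons r rs ih =>
    rw [List.foldl_cons, pvA_step, List.filterMap_cons]
    cases pvPair? r
    · exact ih d
    · exact ih _

theorem pvGroup (l : List (String × String)) :
    ((l.foldl (fun (d : PySem.Dict String (List String)) p => d.modify p.1 [] (fun v => v ++ [p.2])) PySem.Dict.empty).items)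
    = (PySem.List.dedup (l.map (·.1))).map
        (fun name => (name, (l.filter (fun p => p.1 == name)).map (·.2))) := by
  have hnd : ((l.foldl (fun (d : PySem.Dict String (List String)) p => d.modify p.1 [] (fun v => v ++ [p.2])) PySem.Dict.empty).keys).Nodup :=
    PySem.Dict.nodup_keys_foldl_modify_key l (·.1) [] (fun _ p v => v ++ [p.2]) PySem.Dict.empty (by exact List.nodup_nil)
  rw [PySem.Dict.items_eq_map_keys _ hnd []]
  have hkeys :
      (l.foldl (fun (d : PySem.Dict String (List String)) p => d.modify p.1 [] (fun v => v ++ [p.2])) PySem.Dict.empty).keys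
      = PySem.List.dedup (l.map (·.1)) := by
    rw [PySem.Dict.keys_foldl_modify_key, PySem.List.dedup_eq_ofList, PySem.Set.ofList_eq_foldl]
    rfl
  rw [hkeys]
  apply List.map_congr_left
  intro k _
  rw [PySem.Dict.getD_foldl_modify_append]
  simp

-- ===== VERDICT (by name: the statement is the Claim_ definition above) =====
theorem case_status_index_py_spec : Claim_equal_case_status_index_py := by
  intro rs _
  show _ = _
  unfold case_status_index_py case_status_index_py_alt
  rw [pvA_fold, pvB_pairs, pvGroup]
  simp
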